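-- pv_equiv track=rewrite | github.com/mudasirmohd/Shortmails | com/tse/summary_generator.py | get_final_cluster_score_map
-- ===== SOURCE A (Python) =====
-- import operator
--
-- def get_final_cluster_score_map(final_rank_map, cluster_list, total_sentences):
--     final_cluster_score_map = {}
--     per_cluster_elements = {}
--     for index in range(total_sentences):
--         total_score = final_rank_map[index]
--         cluster = cluster_list[index]
--         final_cluster_score_map.setdefault(cluster, {})[index] = total_score
--     final_cluster_sorted_rank_map = {}
--     # Sort all these maps
--     for cluster, rank_map in final_cluster_score_map.items():
--         final_cluster_sorted_rank_map[cluster] = sorted(rank_map.items(), key=operator.itemgetter(1), reverse=True)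
--         per_cluster_elements[cluster] = len(rank_map)
--
--     return final_cluster_sorted_rank_map, per_cluster_elements
-- ===== SOURCE B (Python) =====
-- import operator
--
-- def get_final_cluster_score_map(final_rank_map, cluster_list, total_sentences):
--     # One global stable sort by score (descending), then distribute into clusters.
--     final_cluster_sorted_rank_map = {}
--     per_cluster_elements = {}
--     for index in range(total_sentences):
--         cluster = cluster_list[index]
--         final_cluster_sorted_rank_map.setdefault(cluster, [])
--         per_cluster_elements[cluster] = per_cluster_elements.get(cluster, 0) + 1
--     ranked = sorted(((index, final_rank_map[index]) for index in range(total_sentences)),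
--                     key=operator.itemgetter(1), reverse=True)
--     for index, score in ranked:
--         final_cluster_sorted_rank_map[cluster_list[index]].append((index, score))
--     return final_cluster_sorted_rank_map, per_cluster_elements
-- ===== Notes on version B (the rewrite author's own statement) =====
-- stated objective: alternative
-- what changed: Instead of bucketing scores into per-cluster dicts and sorting each bucket separately, B performs one global stable descending sort of all (index, score) pairs and distributes the sorted stream into per-cluster lists, counting cluster sizes in a first pass; stability makes the per-cluster order identical.
import Mathlib
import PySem

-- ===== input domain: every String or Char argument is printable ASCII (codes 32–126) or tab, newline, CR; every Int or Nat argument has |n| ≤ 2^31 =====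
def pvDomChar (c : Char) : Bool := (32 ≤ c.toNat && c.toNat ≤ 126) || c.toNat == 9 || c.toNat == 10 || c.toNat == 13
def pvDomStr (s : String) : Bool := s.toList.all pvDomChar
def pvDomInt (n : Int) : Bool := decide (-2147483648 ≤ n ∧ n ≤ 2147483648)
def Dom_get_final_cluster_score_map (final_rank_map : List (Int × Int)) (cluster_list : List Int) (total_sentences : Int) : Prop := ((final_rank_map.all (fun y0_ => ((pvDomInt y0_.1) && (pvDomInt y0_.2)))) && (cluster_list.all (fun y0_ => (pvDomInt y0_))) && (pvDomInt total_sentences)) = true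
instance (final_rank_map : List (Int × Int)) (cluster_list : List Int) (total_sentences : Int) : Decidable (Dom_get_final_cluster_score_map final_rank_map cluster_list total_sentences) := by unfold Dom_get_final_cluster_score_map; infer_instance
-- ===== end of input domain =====

-- B replaces A's per-cluster bucket-then-sort by ONE global stable descending sort of all
-- (index, score) pairs distributed into per-cluster lists (objective: alternative, same cost).

-- ===== PORT A =====
def get_final_cluster_score_map (final_rank_map : List (Int × Int)) (cluster_list : List Int) (total_sentences : Int) : (List (Int × List (Int × Int))) × (List (Int × Int)) :=
  -- final_cluster_score_map : dict cluster -> dict index -> score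
  let fcsm : PySem.Dict Int (PySem.Dict Int Int) :=
    (PySem.List.pyRange 0 total_sentences 1).foldl
      (fun d index =>
        d.insert ((PySem.List.pyGet? cluster_list index).getD 0)
          (((d.get? ((PySem.List.pyGet? cluster_list index).getD 0)).getD PySem.Dict.empty).insert
            index (((PySem.Dict.mk final_rank_map).get? index).getD 0)))
      PySem.Dict.empty
  -- second loop: sort each cluster's rank_map, record its size
  let res := fcsm.items.foldl
      (fun (acc : PySem.Dict Int (List (Int × Int)) × PySem.Dict Int Int) cr =>
        (acc.1.insert cr.1 (PySem.List.sorted cr.2.items (fun p => p.2) true),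
         acc.2.insert cr.1 (cr.2.size : Int)))
      (PySem.Dict.empty, PySem.Dict.empty)
  (res.1.items, res.2.items)

-- ===== PORT B =====
def get_final_cluster_score_map_alt (final_rank_map : List (Int × Int)) (cluster_list : List Int) (total_sentences : Int) : (List (Int × List (Int × Int))) × (List (Int × Int)) :=
  -- pass 1: seed each cluster with an empty list and count cluster sizes
  let pass1 := (PySem.List.pyRange 0 total_sentences 1).foldl
      (fun (acc : PySem.Dict Int (List (Int × Int)) × PySem.Dict Int Int) index =>
        (acc.1.setdefault ((PySem.List.pyGet? cluster_list index).getD 0) [],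
         acc.2.insert ((PySem.List.pyGet? cluster_list index).getD 0)
           (acc.2.getD ((PySem.List.pyGet? cluster_list index).getD 0) 0 + 1)))
      (PySem.Dict.empty, PySem.Dict.empty)
  -- one global stable sort by score, descending
  let ranked := PySem.List.sorted
      ((PySem.List.pyRange 0 total_sentences 1).map
        (fun index => (index, ((PySem.Dict.mk final_rank_map).get? index).getD 0)))
      (fun p => p.2) true
  -- pass 2: distribute the sorted stream into the clusters
  let sm := ranked.foldl
      (fun d p => d.modify ((PySem.List.pyGet? cluster_list p.1).getD 0) [] (fun l => l ++ [p]))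
      pass1.1
  (sm.items, pass1.2.items)

-- ===== PRECONDITION & SPEC =====
-- Pre_ excludes exactly the inputs on which Python A raises: a KeyError (some index in
-- range(total_sentences) missing from final_rank_map) or an IndexError (cluster_list too short).
def Pre_get_final_cluster_score_map (final_rank_map : List (Int × Int)) (cluster_list : List Int) (total_sentences : Int) : Prop :=
  total_sentences ≤ (final_rank_map.length : Int) ∧ total_sentences ≤ (cluster_list.length : Int) ∧
  ∀ i ∈ PySem.List.pyRange 0 (min total_sentences (final_rank_map.length : Int)) 1,
    ((PySem.Dict.mk final_rank_map).get? i).isSome = true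
instance (final_rank_map : List (Int × Int)) (cluster_list : List Int) (total_sentences : Int) : Decidable (Pre_get_final_cluster_score_map final_rank_map cluster_list total_sentences) := by unfold Pre_get_final_cluster_score_map; infer_instance

def pvWitness_get_final_cluster_score_map : (List (Int × Int)) × List Int × Int :=
  ([(0, 5), (1, 3), (2, 5)], [4, 7, 4], 3)

def Spec_get_final_cluster_score_map (final_rank_map : List (Int × Int)) (cluster_list : List Int) (total_sentences : Int) (out : (List (Int × List (Int × Int))) × (List (Int × Int))) : Prop := out = get_final_cluster_score_map_alt final_rank_map cluster_list total_sentences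
instance (final_rank_map : List (Int × Int)) (cluster_list : List Int) (total_sentences : Int) (out : (List (Int × List (Int × Int))) × (List (Int × Int))) : Decidable (Spec_get_final_cluster_score_map final_rank_map cluster_list total_sentences out) := by unfold Spec_get_final_cluster_score_map; infer_instance

-- ===== CLAIM (what is proved, stated in full; the proofs are below) =====
def Claim_equal_get_final_cluster_score_map : Prop := ∀ (final_rank_map : List (Int × Int)) (cluster_list : List Int) (total_sentences : Int), Dom_get_final_cluster_score_map final_rank_map cluster_list total_sentences → Pre_get_final_cluster_score_map final_rank_map cluster_list total_sentences → Spec_get_final_cluster_score_map final_rank_map cluster_list total_sentences (get_final_cluster_score_map final_rank_map cluster_list total_sentences)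

-- ===== LEMMAS AND PROOFS =====

-- The descending-by-score order with ties broken by ascending first component.
def pvRle (a b : Int × Int) : Prop := b.2 < a.2 ∨ (a.2 = b.2 ∧ a.1 ≤ b.1)

theorem pvRle_antisymm (a b : Int × Int) (h1 : pvRle a b) (h2 : pvRle b a) : a = b := by
  rcases a with ⟨a1, a2⟩; rcases b with ⟨b1, b2⟩
  simp only [pvRle] at h1 h2
  rcases h1 with h1 | ⟨h1, h1'⟩ <;> rcases h2 with h2 | ⟨h2, h2'⟩ <;> simp_all <;> omega


-- inserting a pair whose first component dominates preserves the stable order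
theorem pv_insertBy_pairwise (x : Int × Int) (ys : List (Int × Int))
    (h1 : ys.Pairwise pvRle) (h2 : ∀ y ∈ ys, y.1 < x.1) :
    (PySem.List.insertBy (fun a b => decide (b.2 < a.2)) x ys).Pairwise pvRle := by
  induction ys with
  | nil => simp [PySem.List.insertBy, pvRle]
  | cons y t ih =>
    simp only [PySem.List.insertBy]
    by_cases hb : y.2 < x.2
    · simp only [hb, decide_true, if_true]
      rcases List.pairwise_cons.mp h1 with ⟨hyt, hpt⟩
      refine List.Pairwise.cons ?_ h1
      intro z hz
      rcases List.mem_cons.mp hz with rfl | hz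
      · exact Or.inl hb
      · have := hyt z hz
        rcases this with h | ⟨h, _⟩
        · exact Or.inl (lt_trans h hb)
        · exact Or.inl (h ▸ hb)
    · simp only [hb, decide_false, Bool.false_eq_true, if_false]
      rcases List.pairwise_cons.mp h1 with ⟨hyt, hpt⟩
      refine List.Pairwise.cons ?_ (ih hpt (fun y hy => h2 y (List.mem_cons_of_mem _ hy)))
      intro z hz
      rcases (PySem.List.mem_insertBy _ _ _ _).mp hz with rfl | hz
      · rcases lt_or_eq_of_le (not_lt.mp hb) with h | h
        · exact Or.inl h
        · exact Or.inr ⟨h.symm, le_of_lt (h2 y (List.mem_cons_self))⟩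
      · exact hyt z hz

theorem pv_foldl_insertBy_pairwise (l : List (Int × Int)) (acc : List (Int × Int))
    (h1 : acc.Pairwise pvRle) (h2 : ∀ a ∈ acc, ∀ p ∈ l, a.1 < p.1)
    (h3 : l.Pairwise (fun a b => a.1 < b.1)) :
    (l.foldl (fun acc x => PySem.List.insertBy (fun a b => decide (b.2 < a.2)) x acc) acc).Pairwise pvRle := by
  induction l generalizing acc with
  | nil => exact h1
  | cons x t ih =>
    rcases List.pairwise_cons.mp h3 with ⟨hxt, ht⟩
    refine ih _ (pv_insertBy_pairwise x acc h1 (fun y hy => h2 y hy x (List.mem_cons_self))) ?_ ht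
    intro a ha p hp
    rcases (PySem.List.mem_insertBy _ _ _ _).mp ha with rfl | ha
    · exact hxt p hp
    · exact h2 a ha p (List.mem_cons_of_mem _ hp)

-- STABILITY: sorting by score descending a list with strictly increasing first components
-- yields the order pvRle (descending score, ties by ascending first component).
theorem pv_sorted_rev_stable (l : List (Int × Int)) (h : l.Pairwise (fun a b => a.1 < b.1)) :
    (PySem.List.sorted l (fun p => p.2) true).Pairwise pvRle := by
  rw [PySem.List.sorted_rev_eq_foldl_insertBy]
  exact pv_foldl_insertBy_pairwise l [] (List.Pairwise.nil) (by simp) h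

-- filtering commutes with the stable descending sort (distinct increasing first components)
theorem pv_sorted_filter_comm (E : List (Int × Int)) (hE : E.Pairwise (fun a b => a.1 < b.1))
    (p : Int × Int → Bool) :
    PySem.List.sorted (E.filter p) (fun q => q.2) true = (PySem.List.sorted E (fun q => q.2) true).filter p := by
  have perm1 : (PySem.List.sorted (E.filter p) (fun q => q.2) true).Perm (E.filter p) :=
    PySem.List.sorted_perm _ _ _
  have perm2 : ((PySem.List.sorted E (fun q => q.2) true).filter p).Perm (E.filter p) :=
    (PySem.List.sorted_perm E (fun q => q.2) true).filter p
  have pw1 : (PySem.List.sorted (E.filter p) (fun q => q.2) true).Pairwise pvRle :=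
    pv_sorted_rev_stable _ (List.Pairwise.filter p hE)
  have pw2 : ((PySem.List.sorted E (fun q => q.2) true).filter p).Pairwise pvRle :=
    List.Pairwise.filter p (pv_sorted_rev_stable E hE)
  exact List.eq_of_perm_of_sorted (fun a b _ _ hab hba => pvRle_antisymm a b hab hba)
    pw1 pw2 (perm1.trans perm2.symm)

-- ---- A-side: characterisation of the bucket loop ----
def pvStepA (cl sc : Int → Int) (d : PySem.Dict Int (PySem.Dict Int Int)) (i : Int) : PySem.Dict Int (PySem.Dict Int Int) :=
  d.insert (cl i) (((d.get? (cl i)).getD PySem.Dict.empty).insert i (sc i))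

theorem pv_bucketsA_getD (cl sc : Int → Int) (is : List Int) (hnd : is.Nodup) (c : Int) :
    ((is.foldl (pvStepA cl sc) PySem.Dict.empty).getD c PySem.Dict.empty).items
      = (is.filter (fun i => cl i == c)).map (fun i => (i, sc i)) := by
  induction is using List.reverseRecOn with
  | nil => rfl
  | append_singleton is i ih =>
    have hnd' : is.Nodup := (List.nodup_append.mp hnd).1
    have h3 := (List.nodup_append.mp hnd).2.2
    have hnotmem : i ∉ is := fun hmem => h3 i hmem i (List.mem_singleton_self i) rfl
    rw [List.foldl_append]
    simp only [List.foldl_cons, List.foldl_nil, pvStepA]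
    rw [PySem.Dict.getD_insert]
    by_cases hc : c = cl i
    · subst hc
      rw [if_pos rfl]
      have hinner : ((is.foldl (pvStepA cl sc) PySem.Dict.empty).get? (cl i)).getD PySem.Dict.empty
          = (is.foldl (pvStepA cl sc) PySem.Dict.empty).getD (cl i) PySem.Dict.empty := by
        rw [PySem.Dict.getD_eq_get?_getD]
      rw [hinner]
      have hnotc : ((is.foldl (pvStepA cl sc) PySem.Dict.empty).getD (cl i) PySem.Dict.empty).contains i = false := by
        have hno : ¬ (((is.foldl (pvStepA cl sc) PySem.Dict.empty).getD (cl i) PySem.Dict.empty).contains i = true) := by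
          rw [PySem.Dict.contains_iff_mem_keys]
          simp only [PySem.Dict.keys, ih hnd']
          simp only [List.map_map, List.mem_map, Function.comp]
          rintro ⟨j, hj, rfl⟩
          exact hnotmem (List.mem_of_mem_filter hj)
        simpa using hno
      rw [PySem.Dict.items_insert_of_not_contains _ _ hnotc, ih hnd']
      simp
    · rw [if_neg hc, ih hnd']
      have hne : (cl i == c) = false := by
        simp only [beq_eq_false_iff_ne, ne_eq]
        exact fun h => hc h.symm
      simp [List.filter_append, hne]

-- ---- B-side: the setdefault pass ----
theorem pv_setdefault_fold_keys (l : List Int) (d : PySem.Dict Int (List (Int × Int))) :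
    (l.foldl (fun d x => d.setdefault x ([] : List (Int × Int))) d).keys = PySem.Set.update d.keys l := by
  induction l generalizing d with
  | nil => rfl
  | cons x t ih =>
    simp only [List.foldl_cons]
    rw [ih]
    have hupd : PySem.Set.update d.keys (x :: t) = PySem.Set.update (PySem.Set.add d.keys x) t := rfl
    rw [hupd]
    congr 1
    by_cases hb : d.contains x = true
    · rw [PySem.Dict.setdefault_of_contains _ _ hb]
      have hmem : x ∈ d.keys := (PySem.Dict.contains_iff_mem_keys _ _).mp hb
      simp [PySem.Set.add, PySem.Set.contains, hmem]
    · have hb' : d.contains x = false := by simpa using hb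
      rw [PySem.Dict.setdefault_of_not_contains _ _ hb']
      have hnmem : x ∉ d.keys := fun hm => hb ((PySem.Dict.contains_iff_mem_keys _ _).mpr hm)
      rw [PySem.Dict.keys_insert_of_not_contains _ _ hb']
      simp [PySem.Set.add, PySem.Set.contains, hnmem]

theorem pv_setdefault_fold_getD (l : List Int) (d : PySem.Dict Int (List (Int × Int))) (c : Int) :
    (l.foldl (fun d x => d.setdefault x ([] : List (Int × Int))) d).getD c [] = d.getD c [] := by
  induction l generalizing d with
  | nil => rfl
  | cons x t ih =>
    simp only [List.foldl_cons]
    rw [ih]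
    by_cases hb : d.contains x = true
    · rw [PySem.Dict.setdefault_of_contains _ _ hb]
    · have hb' : d.contains x = false := by simpa using hb
      rw [PySem.Dict.setdefault_of_not_contains _ _ hb']
      rw [PySem.Dict.getD_insert]
      by_cases hc : c = x
      · subst hc; rw [if_pos rfl, PySem.Dict.getD_of_not_contains _ _ hb']
      · rw [if_neg hc]

-- Set.update by elements already present is the identity
theorem pv_set_update_of_mem (l : List Int) (s : PySem.Set Int) (h : ∀ x ∈ l, x ∈ s) :
    PySem.Set.update s l = s := by
  induction l generalizing s with
  | nil => rfl
  | cons x t ih =>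
    show PySem.Set.update (PySem.Set.add s x) t = s
    have hadd : PySem.Set.add s x = s := by
      simp [PySem.Set.add, PySem.Set.contains, h x List.mem_cons_self]
    rw [hadd]
    exact ih s (fun y hy => h y (List.mem_cons_of_mem _ hy))

-- ---- B-side: the distribution pass ----
theorem pv_modify_fold_getD (cl : Int → Int) (l : List (Int × Int)) (d : PySem.Dict Int (List (Int × Int))) (c : Int) :
    (l.foldl (fun d p => d.modify (cl p.1) [] (fun v => v ++ [p])) d).getD c []
      = d.getD c [] ++ l.filter (fun p => cl p.1 == c) := by
  induction l generalizing d with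
  | nil => simp
  | cons p t ih =>
    simp only [List.foldl_cons]
    rw [ih, PySem.Dict.getD_modify]
    by_cases hc : c = cl p.1
    · subst hc
      simp only [List.filter_cons, beq_self_eq_true, if_true]
      simp [List.append_assoc]
    · rw [if_neg hc]
      have hne : (cl p.1 == c) = false := by
        simp only [beq_eq_false_iff_ne, ne_eq]
        exact fun h => hc h.symm
      simp [hne]

-- counting: length of a filtered list equals the count in the mapped list
theorem pv_count_map_filter (cl : Int → Int) (is : List Int) (c : Int) :
    (((is.filter (fun i => cl i == c)).length : Int)) = (((is.map cl).count c : Int)) := by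
  rw [List.count_eq_countP, List.countP_map, List.countP_eq_length_filter]
  rfl

-- the two loop bodies and the flat pair list, named so the general lemma is readable
def pvLoop2 (acc : PySem.Dict Int (List (Int × Int)) × PySem.Dict Int Int) (cr : Int × PySem.Dict Int Int) : PySem.Dict Int (List (Int × Int)) × PySem.Dict Int Int :=
  (acc.1.insert cr.1 (PySem.List.sorted cr.2.items (fun p => p.2) true), acc.2.insert cr.1 ((cr.2.size : Int)))

def pvPass1 (cl : Int → Int) (R : List Int) : PySem.Dict Int (List (Int × Int)) × PySem.Dict Int Int :=
  R.foldl (fun acc index => (acc.1.setdefault (cl index) [], acc.2.insert (cl index) (acc.2.getD (cl index) 0 + 1))) (PySem.Dict.empty, PySem.Dict.empty)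

def pvE (sc : Int → Int) (R : List Int) : List (Int × Int) := R.map (fun i => (i, sc i))

def pvRanked (sc : Int → Int) (R : List Int) : List (Int × Int) :=
  PySem.List.sorted (pvE sc R) (fun p => p.2) true

-- splitting the two pair-state loops into two independent foldls
theorem pv_split_loop2 (l : List (Int × PySem.Dict Int Int)) (a : PySem.Dict Int (List (Int × Int))) (b : PySem.Dict Int Int) :
    l.foldl pvLoop2 (a, b)
      = (l.foldl (fun a cr => a.insert cr.1 (PySem.List.sorted cr.2.items (fun p => p.2) true)) a,
         l.foldl (fun b cr => b.insert cr.1 ((cr.2.size : Int))) b) := by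
  induction l generalizing a b with
  | nil => rfl
  | cons x t ih => simpa [pvLoop2] using ih _ _

theorem pv_split_pass1 (cl : Int → Int) (R : List Int) (a : PySem.Dict Int (List (Int × Int))) (b : PySem.Dict Int Int) :
    R.foldl (fun (acc : PySem.Dict Int (List (Int × Int)) × PySem.Dict Int Int) index =>
        (acc.1.setdefault (cl index) [], acc.2.insert (cl index) (acc.2.getD (cl index) 0 + 1))) (a, b)
      = (R.foldl (fun a i => a.setdefault (cl i) []) a,
         R.foldl (fun b i => b.insert (cl i) (b.getD (cl i) 0 + 1)) b) := by
  induction R generalizing a b with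
  | nil => rfl
  | cons x t ih => simpa using ih _ _

-- the MAIN equivalence, for an arbitrary index list with distinct increasing entries
theorem pv_general (cl sc : Int → Int) (R : List Int) (hnd : R.Nodup) (hpw : R.Pairwise (· < ·)) :
    ((((R.foldl (pvStepA cl sc) PySem.Dict.empty).items.foldl pvLoop2 (PySem.Dict.empty, PySem.Dict.empty)).1.items,
      ((R.foldl (pvStepA cl sc) PySem.Dict.empty).items.foldl pvLoop2 (PySem.Dict.empty, PySem.Dict.empty)).2.items)
        : (List (Int × List (Int × Int))) × List (Int × Int))
    = ((((pvRanked sc R).foldl (fun d p => d.modify (cl p.1) [] (fun v => v ++ [p])) (pvPass1 cl R).1).items,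
       (pvPass1 cl R).2.items)) := by
  have hKdef : PySem.Set.update ([] : PySem.Set Int) (R.map cl) = PySem.Set.ofList (R.map cl) := rfl
  -- A side, bucket dict
  have hkeysA : (R.foldl (pvStepA cl sc) PySem.Dict.empty).keys = PySem.Set.ofList (R.map cl) := by
    have := PySem.Dict.keys_foldl_insert_key R cl
      (fun d i => (((d.get? (cl i)).getD PySem.Dict.empty).insert i (sc i))) (PySem.Dict.empty)
    rw [PySem.Dict.keys_empty] at this
    exact this.trans hKdef
  have hndA : (R.foldl (pvStepA cl sc) PySem.Dict.empty).keys.Nodup := by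
    rw [hkeysA]; exact PySem.Set.nodup_ofList _
  have hitemsA : (R.foldl (pvStepA cl sc) PySem.Dict.empty).items
      = (PySem.Set.ofList (R.map cl)).map (fun c => (c, (R.foldl (pvStepA cl sc) PySem.Dict.empty).getD c PySem.Dict.empty)) := by
    rw [← hkeysA]
    exact PySem.Dict.items_eq_map_keys _ hndA PySem.Dict.empty
  -- A side, second loop: split the pair state, then a fresh-keys insert loop appends
  have hsplitA : (R.foldl (pvStepA cl sc) PySem.Dict.empty).items.foldl pvLoop2 (PySem.Dict.empty, PySem.Dict.empty)
      = ((R.foldl (pvStepA cl sc) PySem.Dict.empty).items.foldl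
           (fun a cr => a.insert cr.1 (PySem.List.sorted cr.2.items (fun p => p.2) true)) PySem.Dict.empty,
         (R.foldl (pvStepA cl sc) PySem.Dict.empty).items.foldl
           (fun b cr => b.insert cr.1 ((cr.2.size : Int))) PySem.Dict.empty) :=
    pv_split_loop2 _ _ _
  have hfreshnd : ((R.foldl (pvStepA cl sc) PySem.Dict.empty).items.map (fun cr => cr.1)).Nodup := hndA
  have hA1 : ((R.foldl (pvStepA cl sc) PySem.Dict.empty).items.foldl
        (fun a cr => a.insert cr.1 (PySem.List.sorted cr.2.items (fun p => p.2) true)) PySem.Dict.empty).items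
      = (R.foldl (pvStepA cl sc) PySem.Dict.empty).items.map
          (fun cr => (cr.1, PySem.List.sorted cr.2.items (fun p => p.2) true)) := by
    have := PySem.Dict.items_foldl_insert_fresh (R.foldl (pvStepA cl sc) PySem.Dict.empty).items
      (fun cr => cr.1) (fun cr => PySem.List.sorted cr.2.items (fun p => p.2) true) PySem.Dict.empty
      (by intro a _; rfl) hfreshnd
    simpa using this
  have hA2 : ((R.foldl (pvStepA cl sc) PySem.Dict.empty).items.foldl
        (fun b cr => b.insert cr.1 ((cr.2.size : Int))) PySem.Dict.empty).items
      = (R.foldl (pvStepA cl sc) PySem.Dict.empty).items.map (fun cr => (cr.1, (cr.2.size : Int))) := by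
    have := PySem.Dict.items_foldl_insert_fresh (R.foldl (pvStepA cl sc) PySem.Dict.empty).items
      (fun cr => cr.1) (fun cr => ((cr.2.size : Int))) PySem.Dict.empty
      (by intro a _; rfl) hfreshnd
    simpa using this
  -- B side, pass 1: split the pair state
  have hsplitB : pvPass1 cl R
      = (R.foldl (fun a index => a.setdefault (cl index) []) PySem.Dict.empty,
         R.foldl (fun b index => b.insert (cl index) (b.getD (cl index) 0 + 1)) PySem.Dict.empty) :=
    pv_split_pass1 _ _ _ _
  have hkeys0 : (R.foldl (fun a index => a.setdefault (cl index) ([] : List (Int × Int))) PySem.Dict.empty).keys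
      = PySem.Set.ofList (R.map cl) := by
    have h1 : R.foldl (fun a index => a.setdefault (cl index) ([] : List (Int × Int))) PySem.Dict.empty
        = (R.map cl).foldl (fun a x => a.setdefault x ([] : List (Int × Int))) PySem.Dict.empty := by
      rw [List.foldl_map]
    rw [h1, pv_setdefault_fold_keys, PySem.Dict.keys_empty]
    exact hKdef
  have hgetD0 : ∀ c, (R.foldl (fun a index => a.setdefault (cl index) ([] : List (Int × Int))) PySem.Dict.empty).getD c [] = [] := by
    intro c
    have h1 : R.foldl (fun a index => a.setdefault (cl index) ([] : List (Int × Int))) PySem.Dict.empty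
        = (R.map cl).foldl (fun a x => a.setdefault x ([] : List (Int × Int))) PySem.Dict.empty := by
      rw [List.foldl_map]
    rw [h1, pv_setdefault_fold_getD, PySem.Dict.getD_empty]
  -- B side, pass 2 over the globally sorted list
  have hmemranked : ∀ x ∈ (pvRanked sc R).map (fun p => cl p.1), x ∈ PySem.Set.ofList (R.map cl) := by
    intro x hx
    rcases List.mem_map.mp hx with ⟨p, hp, rfl⟩
    have hpE : p ∈ pvE sc R := (PySem.List.mem_sorted _ _ _ _).mp hp
    rcases List.mem_map.mp hpE with ⟨i, hi, rfl⟩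
    exact (PySem.Set.mem_ofList _ _).mpr (List.mem_map.mpr ⟨i, hi, rfl⟩)
  have hkeysB : ((pvRanked sc R).foldl (fun d p => d.modify (cl p.1) [] (fun v => v ++ [p])) (pvPass1 cl R).1).keys
      = PySem.Set.ofList (R.map cl) := by
    have := PySem.Dict.keys_foldl_modify_key (pvRanked sc R) (fun p => cl p.1)
      ([] : List (Int × Int)) (fun _ p => fun v => v ++ [p]) (pvPass1 cl R).1
    rw [this, hsplitB]
    simp only
    rw [hkeys0]
    exact pv_set_update_of_mem _ _ hmemranked
  have hndB : ((pvRanked sc R).foldl (fun d p => d.modify (cl p.1) [] (fun v => v ++ [p])) (pvPass1 cl R).1).keys.Nodup := by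
    rw [hkeysB]; exact PySem.Set.nodup_ofList _
  have hgetDB : ∀ c, ((pvRanked sc R).foldl (fun d p => d.modify (cl p.1) [] (fun v => v ++ [p])) (pvPass1 cl R).1).getD c []
      = (pvRanked sc R).filter (fun p => cl p.1 == c) := by
    intro c
    rw [pv_modify_fold_getD, hsplitB]
    simp only
    rw [hgetD0 c, List.nil_append]
  have hitemsB : ((pvRanked sc R).foldl (fun d p => d.modify (cl p.1) [] (fun v => v ++ [p])) (pvPass1 cl R).1).items
      = (PySem.Set.ofList (R.map cl)).map (fun c => (c, (pvRanked sc R).filter (fun p => cl p.1 == c))) := by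
    have := PySem.Dict.items_eq_map_keys
      ((pvRanked sc R).foldl (fun d p => d.modify (cl p.1) [] (fun v => v ++ [p])) (pvPass1 cl R).1) hndB []
    rw [this, hkeysB]
    exact List.map_congr_left (fun c _ => by rw [hgetDB c])
  -- B side, the counter
  have hcnt : (pvPass1 cl R).2
      = (R.map cl).foldl (fun b x => b.insert x (b.getD x 0 + 1)) PySem.Dict.empty := by
    rw [hsplitB]
    simp only
    rw [List.foldl_map]
  have hkeysC : (pvPass1 cl R).2.keys = PySem.Set.ofList (R.map cl) := by
    rw [hcnt]
    have h2 := PySem.Dict.keys_foldl_insert (R.map cl) (fun (b : PySem.Dict Int Int) x => b.getD x 0 + 1) PySem.Dict.empty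
    rw [PySem.Dict.keys_empty] at h2
    exact h2.trans hKdef
  have hndC : (pvPass1 cl R).2.keys.Nodup := by rw [hkeysC]; exact PySem.Set.nodup_ofList _
  have hgetDC : ∀ c, (pvPass1 cl R).2.getD c 0 = ((R.map cl).count c : Int) := by
    intro c
    rw [hcnt, PySem.Dict.getD_foldl_insert_add_one, PySem.Dict.getD_empty, zero_add]
  have hitemsC : (pvPass1 cl R).2.items
      = (PySem.Set.ofList (R.map cl)).map (fun c => (c, ((R.map cl).count c : Int))) := by
    have := PySem.Dict.items_eq_map_keys (pvPass1 cl R).2 hndC 0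
    rw [this, hkeysC]
    exact List.map_congr_left (fun c _ => by rw [hgetDC c])
  -- per-cluster: stable global sort restricted to a cluster = sorting the cluster's bucket
  have hE : (pvE sc R).Pairwise (fun a b => a.1 < b.1) := by
    unfold pvE
    exact (List.pairwise_map).mpr hpw
  have hperc : ∀ c, PySem.List.sorted ((R.filter (fun i => cl i == c)).map (fun i => (i, sc i))) (fun p => p.2) true
      = (pvRanked sc R).filter (fun p => cl p.1 == c) := by
    intro c
    have hfm : (pvE sc R).filter (fun p => cl p.1 == c) = (R.filter (fun i => cl i == c)).map (fun i => (i, sc i)) := by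
      unfold pvE
      rw [List.filter_map]
      rfl
    have := pv_sorted_filter_comm (pvE sc R) hE (fun p => cl p.1 == c)
    rw [hfm] at this
    exact this
  -- assemble
  rw [hsplitA]
  simp only [Prod.mk.injEq]
  refine ⟨?_, ?_⟩
  · rw [hA1, hitemsA, hitemsB, List.map_map]
    refine List.map_congr_left (fun c _ => ?_)
    simp only [Function.comp_apply]
    rw [pv_bucketsA_getD cl sc R hnd c, hperc c]
  · rw [hA2, hitemsA, hitemsC, List.map_map]
    refine List.map_congr_left (fun c _ => ?_)
    simp only [Function.comp_apply, PySem.Dict.size]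
    rw [pv_bucketsA_getD cl sc R hnd c, List.length_map, pv_count_map_filter]

-- the ports agree on every input (no precondition needed for the Lean ports)
theorem pv_main (final_rank_map : List (Int × Int)) (cluster_list : List Int) (total_sentences : Int) :
    get_final_cluster_score_map final_rank_map cluster_list total_sentences
      = get_final_cluster_score_map_alt final_rank_map cluster_list total_sentences :=
  pv_general (fun i => (PySem.List.pyGet? cluster_list i).getD 0)
    (fun i => ((PySem.Dict.mk final_rank_map).get? i).getD 0)
    (PySem.List.pyRange 0 total_sentences 1)
    (PySem.List.nodup_pyRange_one 0 total_sentences)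
    (PySem.List.pairwise_lt_pyRange_one 0 total_sentences)

-- ===== VERDICT (by name: the statement is the Claim_ definition above) =====
theorem get_final_cluster_score_map_spec : Claim_equal_get_final_cluster_score_map := by
  intro frm cl n _ _
  show _ = _
  exact pv_main frm cl n
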